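-- pv_equiv track=rewrite | github.com/AhmadBinAbdulJabbar/Learning-Python | calculator2.py | check_decimal
-- ===== SOURCE A (Python) =====
-- operators = ['+', '-', '/', '*', '%']
--
-- def check_decimal(expression):
--     last_number = ''
--     for char in expression[::-1]:
--         if char in operators:
--             break
--         last_number = char + last_number
--     if '.' in last_number:
--         return False
--     else:
--         return True
-- ===== SOURCE B (Python) =====
-- operators = ['+', '-', '/', '*', '%']
--
-- def check_decimal(expression):
--     # Single forward pass: a flag records whether a '.' has been seen since
--     # the most recent operator; each operator resets it.
--     has_dot = False
--     for char in expression: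
--         if char in '+-/*%':
--             has_dot = False
--         elif char == '.':
--             has_dot = True
--     return not has_dot
-- ===== Notes on version B (the rewrite author's own statement) =====
-- stated objective: simpler
-- what changed: Replaces the reverse scan that builds the last-number string by repeated prepending and then searches it for a decimal point with a single forward pass keeping one boolean flag (decimal point seen since the most recent operator, reset at each operator); no intermediate string is built.
import Mathlib
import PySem

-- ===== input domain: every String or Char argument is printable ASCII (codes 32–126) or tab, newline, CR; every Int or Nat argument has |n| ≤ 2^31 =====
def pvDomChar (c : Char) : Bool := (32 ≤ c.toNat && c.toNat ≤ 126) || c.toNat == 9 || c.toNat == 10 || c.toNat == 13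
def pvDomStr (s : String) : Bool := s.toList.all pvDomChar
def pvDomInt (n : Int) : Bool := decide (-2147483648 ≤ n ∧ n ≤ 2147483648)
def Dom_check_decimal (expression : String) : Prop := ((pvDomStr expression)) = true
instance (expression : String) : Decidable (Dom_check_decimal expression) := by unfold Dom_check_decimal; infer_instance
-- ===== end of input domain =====

-- B replaces A's reverse scan + string build with one forward pass keeping a boolean flag (simpler; same cost).
-- ===== PORT A =====
def operators : List Char := ['+', '-', '/', '*', '%']

def checkDecimalLoopA : List Char → List Char → List Char
  | [], acc => acc
  | c :: rest, acc => if c ∈ operators then acc else checkDecimalLoopA rest (c :: acc)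

def check_decimal (expression : String) : Bool :=
  let last_number := checkDecimalLoopA expression.toList.reverse []
  if '.' ∈ last_number then false else true

-- ===== PORT B =====
def checkDecimalStep (b : Bool) (c : Char) : Bool :=
  if c ∈ ['+', '-', '/', '*', '%'] then false
  else if c = '.' then true
  else b

def check_decimal_alt (expression : String) : Bool :=
  !(expression.toList.foldl checkDecimalStep false)


-- ===== PRECONDITION & SPEC =====
def Spec_check_decimal (expression : String) (out : Bool) : Prop := out = check_decimal_alt expression
instance (expression : String) (out : Bool) : Decidable (Spec_check_decimal expression out) := by unfold Spec_check_decimal; infer_instance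

-- ===== CLAIM (what is proved, stated in full; the proofs are below) =====
def Claim_equal_check_decimal : Prop := ∀ (expression : String), Dom_check_decimal expression → Spec_check_decimal expression (check_decimal expression)

-- ===== LEMMAS AND PROOFS =====
lemma checkDecimalLoopA_mem (m acc : List Char) :
    decide ('.' ∈ checkDecimalLoopA m acc)
      = (m.foldr (fun c b => checkDecimalStep b c) false || decide ('.' ∈ acc)) := by
  induction m generalizing acc with
  | nil => simp [checkDecimalLoopA]
  | cons c m ih =>
    simp only [checkDecimalLoopA, List.foldr_cons]
    rw [show checkDecimalStep (m.foldr (fun c b => checkDecimalStep b c) false) c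
          = if c ∈ operators then false
            else if c = '.' then true
            else m.foldr (fun c b => checkDecimalStep b c) false from rfl]
    split_ifs with hop hdot
    · simp
    · subst hdot; rw [ih]; simp
    · rw [ih]; simp [List.mem_cons, eq_comm, hdot]

-- ===== VERDICT (by name: the statement is the Claim_ definition above) =====
theorem check_decimal_spec : Claim_equal_check_decimal := by
  intro expression _
  unfold Spec_check_decimal
  have h := checkDecimalLoopA_mem expression.toList.reverse []
  rw [List.foldr_reverse] at h
  simp only [List.not_mem_nil, decide_false, Bool.or_false] at h
  show (if '.' ∈ checkDecimalLoopA expression.toList.reverse [] then false else true)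
      = !(expression.toList.foldl checkDecimalStep false)
  by_cases hmem : '.' ∈ checkDecimalLoopA expression.toList.reverse []
  · rw [if_pos hmem]
    have hf : expression.toList.foldl checkDecimalStep false = true := by
      rw [← h]; simpa using hmem
    rw [hf]; rfl
  · rw [if_neg hmem]
    have hf : expression.toList.foldl checkDecimalStep false = false := by
      rw [← h]; simpa using hmem
    rw [hf]; rfl
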